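-- pv_equiv track=rewrite | github.com/mik11231/python | advent2022/Day24/day24.py | precompute
-- ===== SOURCE A (Python) =====
-- import math
--
-- def precompute(w,h,bl):
--     """Precompute occupied cells for each time t mod cycle length."""
--     W,H=w-2,h-2
--     mod=math.lcm(W,H)
--     occ=[set() for _ in range(mod)]
--     for t in range(mod):
--         s=occ[t]
--         for x,y,c in bl:
--             if c=='>': nx=1+((x-1+t)%W); ny=y
--             elif c=='<': nx=1+((x-1-t)%W); ny=y
--             elif c=='v': nx=x; ny=1+((y-1+t)%H)
--             else: nx=x; ny=1+((y-1-t)%H)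
--             s.add((nx,ny))
--     return occ,mod
-- ===== SOURCE B (Python) =====
-- import math
--
-- def precompute(w, h, bl):
--     """Precompute occupied cells for each time t mod cycle length."""
--     W, H = w - 2, h - 2
--     mod = math.lcm(W, H)
--     if mod == 0:
--         return [], 0
--     cycles = []
--     for x, y, c in bl:
--         if c == '>':
--             cycles.append([(1 + ((x - 1 + r) % W), y) for r in range(abs(W))])
--         elif c == '<':
--             cycles.append([(1 + ((x - 1 - r) % W), y) for r in range(abs(W))])
--         elif c == 'v':
--             cycles.append([(x, 1 + ((y - 1 + r) % H)) for r in range(abs(H))])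
--         else:
--             cycles.append([(x, 1 + ((y - 1 - r) % H)) for r in range(abs(H))])
--     occ = [{cyc[t % len(cyc)] for cyc in cycles} for t in range(mod)]
--     return occ, mod
-- ===== Notes on version B (the rewrite author's own statement) =====
-- stated objective: alternative
-- what changed: Instead of recomputing each blizzard's position with modular arithmetic at every time step (t-outer, blizzard-inner), B precomputes each blizzard's full positional cycle once (one list per blizzard, period |W| or |H|) and then assembles every time step's occupied set by plain table lookups cyc[t % len(cyc)].
import Mathlib
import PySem

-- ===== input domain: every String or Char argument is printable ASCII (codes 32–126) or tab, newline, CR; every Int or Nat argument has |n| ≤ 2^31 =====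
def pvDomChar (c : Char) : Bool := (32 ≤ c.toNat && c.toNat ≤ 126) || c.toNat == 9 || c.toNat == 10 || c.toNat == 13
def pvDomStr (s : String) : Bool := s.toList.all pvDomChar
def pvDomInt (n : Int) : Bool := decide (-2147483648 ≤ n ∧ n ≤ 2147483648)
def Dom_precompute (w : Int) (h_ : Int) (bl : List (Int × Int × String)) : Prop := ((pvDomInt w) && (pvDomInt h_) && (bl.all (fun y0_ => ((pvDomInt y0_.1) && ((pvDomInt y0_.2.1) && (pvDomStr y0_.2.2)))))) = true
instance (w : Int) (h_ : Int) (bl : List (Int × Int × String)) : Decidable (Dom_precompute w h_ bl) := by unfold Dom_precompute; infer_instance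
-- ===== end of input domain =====

-- B precomputes each blizzard's full positional cycle once and assembles every
-- time step by table lookup, instead of A's per-time-step modular recomputation
-- for every blizzard (objective: alternative decomposition).

-- ===== PORT A =====
def precompute (w : Int) (h_ : Int) (bl : List (Int × Int × String)) : (List (List (Int × Int))) × Int :=
  let W := w - 2
  let H := h_ - 2
  let mod : Int := (Int.lcm W H : Int)
  -- occ starts as `mod` empty sets; the loop over t fills occ[t] from all blizzards
  let occ := (PySem.List.pyRange 0 mod 1).map (fun t =>
    bl.foldl (fun s b =>
      let x := b.1
      let y := b.2.1
      let c := b.2.2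
      let p : Int × Int :=
        if c = ">" then (1 + PySem.Int.mod (x - 1 + t) W, y)
        else if c = "<" then (1 + PySem.Int.mod (x - 1 - t) W, y)
        else if c = "v" then (x, 1 + PySem.Int.mod (y - 1 + t) H)
        else (x, 1 + PySem.Int.mod (y - 1 - t) H)
      PySem.Set.add s p) (PySem.Set.empty))
  (occ, mod)

-- ===== PORT B =====
def precompute_alt (w : Int) (h_ : Int) (bl : List (Int × Int × String)) : (List (List (Int × Int))) × Int :=
  let W := w - 2
  let H := h_ - 2
  let mod : Int := (Int.lcm W H : Int)
  if mod = 0 then ([], 0) else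
  -- one precomputed positional cycle per blizzard, in input order
  let cycles : List (List (Int × Int)) := bl.foldl (fun acc b =>
    let x := b.1
    let y := b.2.1
    let c := b.2.2
    let cyc : List (Int × Int) :=
      if c = ">" then (PySem.List.pyRange 0 (W.natAbs : Int) 1).map (fun r => (1 + PySem.Int.mod (x - 1 + r) W, y))
      else if c = "<" then (PySem.List.pyRange 0 (W.natAbs : Int) 1).map (fun r => (1 + PySem.Int.mod (x - 1 - r) W, y))
      else if c = "v" then (PySem.List.pyRange 0 (H.natAbs : Int) 1).map (fun r => (x, 1 + PySem.Int.mod (y - 1 + r) H))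
      else (PySem.List.pyRange 0 (H.natAbs : Int) 1).map (fun r => (x, 1 + PySem.Int.mod (y - 1 - r) H))
    acc ++ [cyc]) []
  -- cyc[t % len(cyc)]: in-range whenever the t-loop runs (mod > 0 forces nonempty cycles)
  let occ := (PySem.List.pyRange 0 mod 1).map (fun t =>
    cycles.foldl (fun s cyc =>
      PySem.Set.add s (PySem.List.pyGetD cyc (PySem.Int.mod t (PySem.List.len cyc)) (0, 0))) (PySem.Set.empty))
  (occ, mod)

-- ===== PRECONDITION & SPEC =====
def Spec_precompute (w : Int) (h_ : Int) (bl : List (Int × Int × String)) (out : (List (List (Int × Int))) × Int) : Prop := out = precompute_alt w h_ bl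
instance (w : Int) (h_ : Int) (bl : List (Int × Int × String)) (out : (List (List (Int × Int))) × Int) : Decidable (Spec_precompute w h_ bl out) := by unfold Spec_precompute; infer_instance

-- ===== CLAIM (what is proved, stated in full; the proofs are below) =====
def Claim_equal_precompute : Prop := ∀ (w : Int) (h_ : Int) (bl : List (Int × Int × String)), Dom_precompute w h_ bl → Spec_precompute w h_ bl (precompute w h_ bl)

-- ===== LEMMAS AND PROOFS =====

-- Python's % with a fixed nonzero divisor only depends on the argument modulo the divisor.
lemma pymod_eq_of_dvd_sub (a a' b : Int) (hb : b ≠ 0) (h : b ∣ a - a') :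
    PySem.Int.mod a b = PySem.Int.mod a' b := by
  have h1 := PySem.Int.floordiv_mul_add_mod a b
  have h2 := PySem.Int.floordiv_mul_add_mod a' b
  have hd : b ∣ PySem.Int.mod a b - PySem.Int.mod a' b := by
    have he : PySem.Int.mod a b - PySem.Int.mod a' b
        = (a - a') - (PySem.Int.floordiv a b - PySem.Int.floordiv a' b) * b := by
      linear_combination h1 - h2
    rw [he]
    exact dvd_sub h (Dvd.dvd.mul_left (dvd_refl b) _)
  have hm : (PySem.Int.mod a b - PySem.Int.mod a' b).natAbs < b.natAbs := by
    rcases lt_or_gt_of_ne hb with hneg | hpos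
    · have b1 := PySem.Int.mod_neg_bounds (a := a) hneg
      have b2 := PySem.Int.mod_neg_bounds (a := a') hneg
      omega
    · have b1 := PySem.Int.mod_nonneg (a := a) hpos
      have b2 := PySem.Int.mod_lt (a := a) hpos
      have b3 := PySem.Int.mod_nonneg (a := a') hpos
      have b4 := PySem.Int.mod_lt (a := a') hpos
      omega
  have hz := Int.eq_zero_of_dvd_of_natAbs_lt_natAbs hd hm
  omega

-- looked-up cycle entry = A's directly computed position, for nonzero period
lemma cycle_lookup (f : Int → Int × Int) (M : Int) (t : Int) (hM : M ≠ 0)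
    (hf : ∀ r r' : Int, M ∣ r - r' → f r = f r') :
    PySem.List.pyGetD ((PySem.List.pyRange 0 (M.natAbs : Int) 1).map f)
      (PySem.Int.mod t (PySem.List.len ((PySem.List.pyRange 0 (M.natAbs : Int) 1).map f))) (0, 0) = f t := by
  have hlen : PySem.List.len ((PySem.List.pyRange 0 (M.natAbs : Int) 1).map f) = (M.natAbs : Int) := by
    simp [PySem.List.len_eq, PySem.List.length_pyRange_one]
  rw [hlen]
  have hpos : (0 : Int) < (M.natAbs : Int) := by omega
  have h0 : 0 ≤ PySem.Int.mod t (M.natAbs : Int) := PySem.Int.mod_nonneg (a := t) hpos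
  have h1 : PySem.Int.mod t (M.natAbs : Int) < (M.natAbs : Int) := PySem.Int.mod_lt (a := t) hpos
  rw [PySem.List.pyGetD_map_pyRange_of_nonneg f _ _ _ h0 h1]
  apply hf
  have hfm := PySem.Int.floordiv_mul_add_mod t (M.natAbs : Int)
  have hd1 : (M.natAbs : Int) ∣ t - PySem.Int.mod t (M.natAbs : Int) :=
    ⟨PySem.Int.floordiv t (M.natAbs : Int), by linear_combination -hfm⟩
  exact dvd_sub_comm.mp (Int.dvd_natAbs_self.trans hd1)

-- ===== VERDICT (by name: the statement is the Claim_ definition above) =====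
theorem precompute_spec : Claim_equal_precompute := by
  intro w h_ bl _
  show precompute w h_ bl = precompute_alt w h_ bl
  unfold precompute precompute_alt
  dsimp only
  split_ifs with hm
  · refine Prod.ext ?_ hm
    dsimp only
    rw [hm, PySem.List.pyRange_one_eq_nil le_rfl, List.map_nil]
  refine Prod.ext ?_ rfl
  rw [PySem.List.foldl_append_singleton_eq_map, List.nil_append]
  simp only [List.foldl_map]
  apply List.map_congr_left
  intro t ht
  rw [PySem.List.mem_pyRange_one] at ht
  have hlcm : Int.lcm (w - 2) (h_ - 2) ≠ 0 := by
    intro h0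
    rw [h0] at hm
    exact hm rfl
  have hW : w - 2 ≠ 0 := by
    intro h0
    apply hlcm
    unfold Int.lcm
    rw [h0]
    simp
  have hH : h_ - 2 ≠ 0 := by
    intro h0
    apply hlcm
    unfold Int.lcm
    rw [h0]
    simp
  apply PySem.List.foldl_congr_mem
  intro s b _
  dsimp only
  split_ifs with hc1 hc2 hc3
  · refine (congrArg (PySem.Set.add s) (cycle_lookup
      (fun r => (1 + PySem.Int.mod (b.1 - 1 + r) (w - 2), b.2.1)) (w - 2) t hW ?_)).symm
    intro r r' hd
    have he : (b.1 - 1 + r) - (b.1 - 1 + r') = r - r' := by ring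
    simp only
    rw [pymod_eq_of_dvd_sub _ _ _ hW (he ▸ hd)]
  · refine (congrArg (PySem.Set.add s) (cycle_lookup
      (fun r => (1 + PySem.Int.mod (b.1 - 1 - r) (w - 2), b.2.1)) (w - 2) t hW ?_)).symm
    intro r r' hd
    have hd' : w - 2 ∣ (b.1 - 1 - r) - (b.1 - 1 - r') := by
      have he : (b.1 - 1 - r) - (b.1 - 1 - r') = r' - r := by ring
      rw [he]
      exact dvd_sub_comm.mp hd
    simp only
    rw [pymod_eq_of_dvd_sub _ _ _ hW hd']
  · refine (congrArg (PySem.Set.add s) (cycle_lookup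
      (fun r => (b.1, 1 + PySem.Int.mod (b.2.1 - 1 + r) (h_ - 2))) (h_ - 2) t hH ?_)).symm
    intro r r' hd
    have he : (b.2.1 - 1 + r) - (b.2.1 - 1 + r') = r - r' := by ring
    simp only
    rw [pymod_eq_of_dvd_sub _ _ _ hH (he ▸ hd)]
  · refine (congrArg (PySem.Set.add s) (cycle_lookup
      (fun r => (b.1, 1 + PySem.Int.mod (b.2.1 - 1 - r) (h_ - 2))) (h_ - 2) t hH ?_)).symm
    intro r r' hd
    have hd' : h_ - 2 ∣ (b.2.1 - 1 - r) - (b.2.1 - 1 - r') := by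
      have he : (b.2.1 - 1 - r) - (b.2.1 - 1 - r') = r' - r := by ring
      rw [he]
      exact dvd_sub_comm.mp hd
    simp only
    rw [pymod_eq_of_dvd_sub _ _ _ hH hd']
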